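-- pv_equiv track=rewrite | github.com/acmeism/RosettaCodeData | Task/Ethiopian-multiplication/Python/ethiopian-multiplication-2.py | ethiopian
-- ===== SOURCE A (Python) =====
-- halve  = lambda x: x // 2
--
-- double = lambda x: x*2
--
-- even   = lambda x: not x % 2
--
-- def ethiopian(multiplier, multiplicand):
--     result = 0
--
--     while multiplier >= 1:
--         if not even(multiplier):
--             result += multiplicand
--         multiplier   = halve(multiplier)
--         multiplicand = double(multiplicand)
--
--     return result
-- ===== SOURCE B (Python) =====
-- def ethiopian(multiplier, multiplicand):
--     if multiplier < 1:
--         return 0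
--     return (multiplicand if multiplier % 2 else 0) + ethiopian(multiplier // 2, multiplicand * 2)
-- ===== Notes on version B (the rewrite author's own statement) =====
-- stated objective: alternative
-- what changed: Replaced the while-loop with a mutable accumulator by a direct recursion on the halved multiplier with doubled multiplicand, returning the summand at each level instead of accumulating.
import Mathlib
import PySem

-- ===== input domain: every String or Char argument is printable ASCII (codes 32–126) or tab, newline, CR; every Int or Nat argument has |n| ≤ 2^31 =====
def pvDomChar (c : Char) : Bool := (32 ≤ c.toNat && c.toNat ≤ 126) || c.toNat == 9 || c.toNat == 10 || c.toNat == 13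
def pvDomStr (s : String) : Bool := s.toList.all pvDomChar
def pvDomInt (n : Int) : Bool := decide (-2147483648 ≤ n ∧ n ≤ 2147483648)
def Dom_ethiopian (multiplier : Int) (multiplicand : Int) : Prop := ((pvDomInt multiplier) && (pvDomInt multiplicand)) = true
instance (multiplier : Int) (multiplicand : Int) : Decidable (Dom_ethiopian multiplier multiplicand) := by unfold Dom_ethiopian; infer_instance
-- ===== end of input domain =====

-- B replaces A's while-loop with a mutable accumulator by a direct recursion on the halved multiplier (alternative decomposition, same cost).


-- halving the multiplier strictly decreases its toNat while it is ≥ 1 (termination measure for both ports)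
theorem pvHalveDec (m : Int) (h : 1 ≤ m) : (PySem.Int.floordiv m 2).toNat < m.toNat := by
  rw [PySem.Int.floordiv_eq_ediv_of_pos (by omega)]
  omega

-- ===== PORT A =====
-- the while-loop of A, state (multiplier, multiplicand, result)
def ethLoop (multiplier multiplicand result : Int) : Int :=
  if h1 : 1 ≤ multiplier then
    ethLoop (PySem.Int.floordiv multiplier 2) (multiplicand * 2)
      (if ¬ (PySem.Int.mod multiplier 2 = 0) then result + multiplicand else result)
  else result
termination_by multiplier.toNat
decreasing_by exact pvHalveDec multiplier h1

def ethiopian (multiplier : Int) (multiplicand : Int) : Int :=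
  ethLoop multiplier multiplicand 0

-- ===== PORT B =====
def ethiopian_alt (multiplier : Int) (multiplicand : Int) : Int :=
  if h : multiplier < 1 then 0
  else (if ¬ (PySem.Int.mod multiplier 2 = 0) then multiplicand else 0) +
    ethiopian_alt (PySem.Int.floordiv multiplier 2) (multiplicand * 2)
termination_by multiplier.toNat
decreasing_by exact pvHalveDec multiplier (by omega)

-- ===== PRECONDITION & SPEC =====
def Spec_ethiopian (multiplier : Int) (multiplicand : Int) (out : Int) : Prop := out = ethiopian_alt multiplier multiplicand
instance (multiplier : Int) (multiplicand : Int) (out : Int) : Decidable (Spec_ethiopian multiplier multiplicand out) := by unfold Spec_ethiopian; infer_instance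

-- ===== CLAIM (what is proved, stated in full; the proofs are below) =====
def Claim_equal_ethiopian : Prop := ∀ (multiplier : Int) (multiplicand : Int), Dom_ethiopian multiplier multiplicand → Spec_ethiopian multiplier multiplicand (ethiopian multiplier multiplicand)

-- ===== LEMMAS AND PROOFS =====
theorem ethLoop_eq (n : Nat) : ∀ (m c r : Int), m.toNat ≤ n → ethLoop m c r = r + ethiopian_alt m c := by
  induction n with
  | zero =>
    intro m c r hm
    rw [ethLoop, ethiopian_alt]
    have : ¬ (1 ≤ m) := by omega
    simp [this, show m < 1 by omega]
  | succ n ih =>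
    intro m c r hm
    rw [ethLoop, ethiopian_alt]
    by_cases h : 1 ≤ m
    · have hd := pvHalveDec m h
      rw [dif_pos h, dif_neg (show ¬ m < 1 by omega),
        ih (PySem.Int.floordiv m 2) (c * 2) _ (by omega)]
      split_ifs <;> ring
    · simp [h, show m < 1 by omega]

-- ===== VERDICT (by name: the statement is the Claim_ definition above) =====
theorem ethiopian_spec : Claim_equal_ethiopian := by
  intro m c _
  unfold Spec_ethiopian ethiopian
  rw [ethLoop_eq m.toNat m c 0 le_rfl]
  ring
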